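-- pv_equiv track=rewrite | github.com/RobaChimdesa/leetcode | 2460-apply-operations-to-an-array/2460-apply-operations-to-an-array.py | applyOperations
-- ===== SOURCE A (Python) =====
-- from typing import List
--
-- def applyOperations(nums: List[int]) -> List[int]:
--     zero =0
--     j =0
--     for i in range(len(nums)-1):
--         if nums[i] == nums[i+1]:
--             nums[i] = nums[i]*2
--             nums[i+1]= 0
--     zero = nums.count(0)
--     nums = [i for i in nums if i !=0]
--     return nums+([0]*zero)
-- ===== SOURCE B (Python) =====
-- from typing import List
--
-- def applyOperations(nums: List[int]) -> List[int]:
--     # Single pass: carry the current (possibly doubled/zeroed) value, emit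
--     # non-zeros in order and count zeros, then pad.  (Return value only; does
--     # not reproduce A's in-place doubling of the argument.)
--     out = []
--     zeros = 0
--     prev = None
--     for x in nums:
--         if prev is None:
--             prev = x
--             continue
--         if prev == x:
--             emit, prev = prev * 2, 0
--         else:
--             emit, prev = prev, x
--         if emit != 0:
--             out.append(emit)
--         else:
--             zeros += 1
--     if prev is not None:
--         if prev != 0:
--             out.append(prev)
--         else:
--             zeros += 1
--     return out + [0] * zeros
-- ===== Notes on version B (the rewrite author's own statement) =====
-- stated objective: simpler
-- what changed: Replaces A's three passes (index-loop with in-place writes, count(0), filter comprehension, concatenation) by a single forward pass carrying the current merged value, emitting non-zeros and counting zeros as it goes; B does not mutate the argument (return-value equivalence).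
import Mathlib
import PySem

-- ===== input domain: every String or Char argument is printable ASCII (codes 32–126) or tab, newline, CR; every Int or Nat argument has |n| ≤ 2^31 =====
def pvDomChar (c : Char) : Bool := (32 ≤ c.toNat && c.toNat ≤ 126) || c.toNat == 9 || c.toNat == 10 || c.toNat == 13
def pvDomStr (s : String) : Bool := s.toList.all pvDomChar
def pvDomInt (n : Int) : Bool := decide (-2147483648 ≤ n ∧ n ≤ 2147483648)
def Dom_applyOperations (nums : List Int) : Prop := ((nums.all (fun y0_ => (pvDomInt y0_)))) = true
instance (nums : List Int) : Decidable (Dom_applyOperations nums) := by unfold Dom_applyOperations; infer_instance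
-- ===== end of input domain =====

-- B changes only the algorithm (one pass instead of three); equivalence is about the
-- RETURN value: Python A additionally mutates its argument in place (doubling pass), B does not.

-- ===== PORT A =====
-- one iteration of A's index loop (indices produced by range are always in range,
-- so getD/set with in-range indices are exact for Python's nums[i] / assignment)
def applyOperationsStep (l : List Int) (i : Nat) : List Int :=
  if l.getD i 0 = l.getD (i+1) 0 then (l.set i (l.getD i 0 * 2)).set (i+1) 0 else l

def applyOperations (nums : List Int) : List Int :=
  let nums2 := (List.range (nums.length - 1)).foldl applyOperationsStep nums
  let zero := nums2.count 0
  nums2.filter (fun i => decide (i ≠ 0)) ++ List.replicate zero 0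

-- ===== PORT B =====
-- B's loop body: prev carries the current merged value; emit non-zeros, count zeros
def applyOperationsAltLoop (prev : Int) (xs : List Int) : List Int × Nat :=
  match xs with
  | [] => if prev ≠ 0 then ([prev], 0) else ([], 1)
  | x :: xs =>
    let (emit, prev') := if prev = x then (prev * 2, (0 : Int)) else (prev, x)
    let (out, z) := applyOperationsAltLoop prev' xs
    if emit ≠ 0 then (emit :: out, z) else (out, z + 1)

def applyOperations_alt (nums : List Int) : List Int :=
  match nums with
  | [] => []
  | p :: rest =>
    let (out, z) := applyOperationsAltLoop p rest
    out ++ List.replicate z 0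

-- ===== PRECONDITION & SPEC =====
def Spec_applyOperations (nums : List Int) (out : List Int) : Prop := out = applyOperations_alt nums
instance (nums : List Int) (out : List Int) : Decidable (Spec_applyOperations nums out) := by unfold Spec_applyOperations; infer_instance

-- ===== CLAIM (what is proved, stated in full; the proofs are below) =====
def Claim_equal_applyOperations : Prop := ∀ (nums : List Int), Dom_applyOperations nums → Spec_applyOperations nums (applyOperations nums)

-- ===== LEMMAS AND PROOFS =====

-- the list A's doubling loop produces, described structurally
def pvTr : Int → List Int → List Int
  | p, [] => [p]
  | p, x :: xs => if p = x then p * 2 :: pvTr 0 xs else p :: pvTr x xs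

theorem pv_getD_append_len (done : List Int) (p : Int) (rest : List Int) (d : Int) :
    (done ++ p :: rest).getD done.length d = p := by
  induction done with
  | nil => simp
  | cons a t ih => simpa using ih

theorem pv_getD_append_len_succ (done : List Int) (p x : Int) (rest : List Int) (d : Int) :
    (done ++ p :: x :: rest).getD (done.length + 1) d = x := by
  induction done with
  | nil => simp
  | cons a t ih => simpa using ih

theorem pv_set_append_len (done : List Int) (p : Int) (rest : List Int) (v : Int) :
    (done ++ p :: rest).set done.length v = done ++ v :: rest := by
  induction done with
  | nil => simp
  | cons a t ih => simpa using ih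

theorem pv_set_append_len_succ (done : List Int) (p x : Int) (rest : List Int) (v : Int) :
    (done ++ p :: x :: rest).set (done.length + 1) v = done ++ p :: v :: rest := by
  induction done with
  | nil => simp
  | cons a t ih => simpa using ih

theorem pv_fold_eq_tr (rest : List Int) : ∀ (done : List Int) (p : Int),
    (List.range' done.length rest.length).foldl applyOperationsStep (done ++ p :: rest)
      = done ++ pvTr p rest := by
  induction rest with
  | nil => intro done p; simp [pvTr]
  | cons x xs ih =>
    intro done p
    rw [List.length_cons, List.range'_succ, List.foldl_cons]
    by_cases h : p = x
    · have hstep : applyOperationsStep (done ++ p :: x :: xs) done.length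
          = (done ++ [p * 2]) ++ 0 :: xs := by
        simp only [applyOperationsStep, pv_getD_append_len, pv_getD_append_len_succ, h,
          if_pos rfl, pv_set_append_len, pv_set_append_len_succ]
        simp [h]
      rw [hstep, List.append_assoc, List.singleton_append]
      have := ih (done ++ [p * 2]) 0
      simp only [List.append_assoc, List.singleton_append, List.length_append,
        List.length_cons, List.length_nil, Nat.zero_add] at this
      rw [this]
      simp [pvTr, h]
    · have hstep : applyOperationsStep (done ++ p :: x :: xs) done.length
          = done ++ p :: x :: xs := by
        simp [applyOperationsStep, pv_getD_append_len, pv_getD_append_len_succ, h]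
      rw [hstep]
      have := ih (done ++ [p]) x
      simp only [List.append_assoc, List.singleton_append, List.length_append,
        List.length_cons, List.length_nil, Nat.zero_add] at this
      rw [this]
      simp [pvTr, h]

theorem pv_altLoop_eq (xs : List Int) : ∀ (p : Int),
    applyOperationsAltLoop p xs
      = ((pvTr p xs).filter (fun x => decide (x ≠ 0)), (pvTr p xs).count 0) := by
  induction xs with
  | nil =>
    intro p
    by_cases h : p = 0 <;>
      simp [applyOperationsAltLoop, pvTr, List.filter, List.count_cons, h]
  | cons x xs ih =>
    intro p
    by_cases h : p = x
    · subst h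
      by_cases h2 : p * 2 = 0
      · simp [applyOperationsAltLoop, pvTr, ih, List.filter, List.count_cons, h2,
          Nat.add_comm]
      · simp [applyOperationsAltLoop, pvTr, ih, List.filter, List.count_cons, h2]
    · by_cases h2 : p = 0
      · subst h2
        simp [applyOperationsAltLoop, pvTr, ih, h, List.count_cons, Nat.add_comm]
      · simp [applyOperationsAltLoop, pvTr, ih, h, h2, List.count_cons]

-- ===== VERDICT (by name: the statement is the Claim_ definition above) =====
theorem applyOperations_spec : Claim_equal_applyOperations := by
  intro nums _
  unfold Spec_applyOperations applyOperations applyOperations_alt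
  cases nums with
  | nil => simp
  | cons p rest =>
    have hfold := pv_fold_eq_tr rest [] p
    simp only [List.length_nil, List.nil_append] at hfold
    simp only [List.length_cons, Nat.add_sub_cancel, List.range_eq_range', hfold,
      pv_altLoop_eq]
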